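-- pv_equiv track=rewrite | github.com/Abercus/devianceminingthesis | DevianceMiningPipeline/declaretemplates_data.py | template_alternate_response
-- ===== SOURCE A (Python) =====
-- def template_alternate_response(trace, event_set):
--     """
--     If there is A, it has to be eventually followed by B.
--     Alternate: there cant be any further A until first next B
--     :param trace:
--     :param event_set:
--     :return:
--     """
--     # exactly 2 event
--     assert (len(event_set) == 2)
--
--     event_1 = event_set[0]
--     event_2 = event_set[1]
--
--     if event_1 in trace:
--         if event_2 in trace:
--
--             event_2_ind = 0
--
--             event_1_positions = trace[event_1]
--             event_2_positions = trace[event_2]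
--
--             for i, pos1 in enumerate(event_1_positions):
--                 # find first in event_2_positions, it has to be before next in event_1_positions
--                 next_event_1_pos = None
--                 if i < len(event_1_positions) - 1:
--                     next_event_1_pos = event_1_positions[i + 1]
--
--                 while True:
--                     if event_2_ind >= len(event_2_positions):
--                         # out of response events
--                         return -1, False
--
--                     if event_2_positions[event_2_ind] > pos1:
--                         # found first greater than event 1 pos
--                         # check if it is smaller than next event 1
--                         if next_event_1_pos and event_2_positions[event_2_ind] > next_event_1_pos:
--                             # next event 2 is after next event 1..
--                             return -1, False
--                         else:
--                             # consume event 2 and break out to next event 1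
--                             event_2_ind += 1
--                             break
--
--                     event_2_ind += 1
--
--             count = len(event_1_positions)
--             return count, False
--             # every event 2 position has to be after respective event 1 position and before next event 2 position
--
--
--
--         else:
--             return -1, False
--
--     # Vacuously
--     return 0, True
-- ===== SOURCE B (Python) =====
-- def template_alternate_response(trace, event_set):
--     """
--     If there is A, it has to be eventually followed by B.
--     Alternate: there cant be any further A until first next B
--     Single flat pass over the response positions instead of nested loops over
--     the activation positions with an inner scanning while-loop.
--     """
--     assert (len(event_set) == 2)
--
--     event_1, event_2 = event_set
--
--     if event_1 not in trace:
--         # Vacuously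
--         return 0, True
--     if event_2 not in trace:
--         return -1, False
--
--     a_pos = trace[event_1]
--     b_pos = trace[event_2]
--     n = len(a_pos)
--
--     i = 0  # index of the next activation still waiting for its response
--     for b in b_pos:
--         if i >= n:
--             break
--         if b > a_pos[i]:
--             nxt = a_pos[i + 1] if i + 1 < n else None
--             if nxt and b > nxt:
--                 # this response comes only after the next activation
--                 return -1, False
--             i += 1
--
--     if i < n:
--         # some activation never got a response
--         return -1, False
--     return n, False
-- ===== Notes on version B (the rewrite author's own statement) =====
-- stated objective: simpler
-- what changed: A's nested loops (outer over activation positions, inner while-loop advancing a shared pointer over response positions) are replaced by a single flat pass over the response positions that carries one activation index; the outer guards are kept, so the whole check is one loop with one running counter.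
import Mathlib
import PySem

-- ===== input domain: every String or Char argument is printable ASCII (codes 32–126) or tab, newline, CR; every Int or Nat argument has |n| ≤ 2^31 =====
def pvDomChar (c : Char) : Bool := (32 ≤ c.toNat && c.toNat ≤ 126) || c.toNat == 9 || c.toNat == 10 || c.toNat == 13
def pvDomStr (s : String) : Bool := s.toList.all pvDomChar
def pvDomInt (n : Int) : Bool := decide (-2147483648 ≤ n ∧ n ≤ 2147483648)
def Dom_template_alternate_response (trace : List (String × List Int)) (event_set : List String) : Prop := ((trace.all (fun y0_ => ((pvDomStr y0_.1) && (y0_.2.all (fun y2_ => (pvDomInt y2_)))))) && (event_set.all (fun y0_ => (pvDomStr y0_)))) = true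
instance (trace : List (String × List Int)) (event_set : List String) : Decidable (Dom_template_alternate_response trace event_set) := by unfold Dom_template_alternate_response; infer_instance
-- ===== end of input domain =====

-- B replaces A's nested loops (outer over activations, inner while advancing a shared
-- pointer over responses) with a single flat pass over the response positions carrying an
-- activation index (objective: simpler, same linear cost).

-- ===== PORT A =====
-- inner `while True` loop of A: scan event_2_positions from index ind for the first
-- position > pos1; none = `return -1, False`, some ind' = the pointer after consuming it
def pvInnerA (b2 : List Int) (pos1 : Int) (nxt : Option Int) (ind : Nat) : Option Nat :=
  if _h : b2.length ≤ ind then none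
  else
    if pos1 < b2[ind]! then
      -- `if next_event_1_pos and event_2_positions[event_2_ind] > next_event_1_pos`
      -- (Python truthiness: None and 0 are both falsy)
      if (match nxt with
          | some n => decide (¬ n = 0) && decide (n < b2[ind]!)
          | none => false) then none
      else some (ind + 1)
    else pvInnerA b2 pos1 nxt (ind + 1)
termination_by b2.length - ind

-- outer `for i, pos1 in enumerate(event_1_positions)` loop; next_event_1_pos is the head
-- of the remaining positions (= event_1_positions[i+1] when it exists, else None)
def pvOuterA (b2 : List Int) : List Int → Nat → Bool
  | [], _ => true
  | pos1 :: rest, ind =>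
    match pvInnerA b2 pos1 rest.head? ind with
    | none => false
    | some ind' => pvOuterA b2 rest ind'

def template_alternate_response (trace : List (String × List Int)) (event_set : List String) : Int × Bool :=
  match event_set with
  | [e1, e2] =>
    match trace.lookup e1 with
    | none => (0, true)                -- vacuously
    | some aps =>
      match trace.lookup e2 with
      | none => (-1, false)
      | some bps =>
        if pvOuterA bps aps 0 then ((aps.length : Int), false) else (-1, false)
  | _ => (0, true)                     -- unreachable: Pre_ requires len(event_set) == 2

-- ===== PORT B =====
-- single pass over the response positions; i = index of next activation awaiting a response
def pvLoopB (a : List Int) : List Int → Nat → Option Nat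
  | [], i => some i
  | b :: bs, i =>
    if a.length ≤ i then some i        -- break
    else if a[i]! < b then
      if (match a[i + 1]? with          -- nxt = a_pos[i+1] if i+1 < n else None
          | some n => decide (¬ n = 0) && decide (n < b)
          | none => false) then none    -- return -1, False
      else pvLoopB a bs (i + 1)
    else pvLoopB a bs i

def template_alternate_response_alt (trace : List (String × List Int)) (event_set : List String) : Int × Bool :=
  if event_set.length = 2 then        -- `event_1, event_2 = event_set`
    let e1 := event_set[0]!
    let e2 := event_set[1]!
    if (trace.lookup e1).isNone then (0, true)
    else if (trace.lookup e2).isNone then (-1, false)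
    else
      let aps := (trace.lookup e1).getD []
      let bps := (trace.lookup e2).getD []
      let r := pvLoopB aps bps 0
      if r.isNone then (-1, false)      -- an early `return -1, False` inside the loop
      else if r.getD 0 < aps.length then (-1, false)
      else ((aps.length : Int), false)
  else (0, true)

-- ===== PRECONDITION & SPEC =====
-- Pre_ excludes exactly the inputs on which A's `assert len(event_set) == 2` raises AssertionError.
def Pre_template_alternate_response (trace : List (String × List Int)) (event_set : List String) : Prop :=
  event_set.length = 2
instance (trace : List (String × List Int)) (event_set : List String) : Decidable (Pre_template_alternate_response trace event_set) := by unfold Pre_template_alternate_response; infer_instance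

def pvWitness_template_alternate_response : (List (String × List Int)) × List String :=
  ([("a", [1, 3]), ("b", [2, 4])], ["a", "b"])

def Spec_template_alternate_response (trace : List (String × List Int)) (event_set : List String) (out : Int × Bool) : Prop := out = template_alternate_response_alt trace event_set
instance (trace : List (String × List Int)) (event_set : List String) (out : Int × Bool) : Decidable (Spec_template_alternate_response trace event_set out) := by unfold Spec_template_alternate_response; infer_instance

-- ===== CLAIM (what is proved, stated in full; the proofs are below) =====
def Claim_equal_template_alternate_response : Prop := ∀ (trace : List (String × List Int)) (event_set : List String), Dom_template_alternate_response trace event_set → Pre_template_alternate_response trace event_set → Spec_template_alternate_response trace event_set (template_alternate_response trace event_set)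

-- ===== LEMMAS AND PROOFS =====

-- proof-only structural versions of A's index-based loops
def pvInnerS (pos1 : Int) (nxt : Option Int) : List Int → Option (List Int)
  | [] => none
  | b :: bs =>
    if pos1 < b then
      if (match nxt with
          | some n => decide (¬ n = 0) && decide (n < b)
          | none => false) then none
      else some bs
    else pvInnerS pos1 nxt bs

def pvOuterS : List Int → List Int → Bool
  | [], _ => true
  | pos1 :: rest, bs =>
    match pvInnerS pos1 rest.head? bs with
    | none => false
    | some bs' => pvOuterS rest bs'

lemma pvInnerS_suffix (pos1 : Int) (nxt : Option Int) :
    ∀ (bs bs' : List Int), pvInnerS pos1 nxt bs = some bs' → bs' <:+ bs := by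
  intro bs
  induction bs with
  | nil => intro bs' h; simp [pvInnerS] at h
  | cons b rest ih =>
    intro bs' h
    simp only [pvInnerS] at h
    split_ifs at h with h1 h2
    · injection h with h'
      rw [← h']
      exact List.suffix_cons b rest
    · exact (ih bs' h).trans (List.suffix_cons b rest)

lemma pvInnerA_eq (b2 : List Int) (pos1 : Int) (nxt : Option Int) :
    ∀ ind, pvInnerA b2 pos1 nxt ind =
      (pvInnerS pos1 nxt (b2.drop ind)).map (fun bs => b2.length - bs.length) := by
  intro ind
  induction hk : b2.length - ind using Nat.strong_induction_on generalizing ind with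
  | _ k ih =>
    by_cases h : b2.length ≤ ind
    · rw [pvInnerA.eq_def]
      simp [h, List.drop_eq_nil_of_le h, pvInnerS]
    · rw [not_le] at h
      rw [pvInnerA.eq_def]
      rw [dif_neg (not_le.mpr h)]
      have hbang : b2[ind]! = b2[ind] := by
        simp [List.getElem!_eq_getElem?_getD, List.getElem?_eq_getElem h]
      rw [hbang, List.drop_eq_getElem_cons h]
      simp only [pvInnerS]
      split_ifs with h1 h2
      · rfl
      · simp only [Option.map_some, Option.some.injEq, List.length_drop]
        omega
      · exact ih (b2.length - (ind + 1)) (by omega) (ind + 1) rfl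

lemma pvOuterA_eq (b2 : List Int) :
    ∀ (as : List Int) (ind : Nat), pvOuterA b2 as ind = pvOuterS as (b2.drop ind) := by
  intro as
  induction as with
  | nil => intro ind; rfl
  | cons p rest ih =>
    intro ind
    rw [pvOuterA, pvOuterS, pvInnerA_eq]
    cases h : pvInnerS p rest.head? (b2.drop ind) with
    | none => rfl
    | some bs' =>
      simp only [Option.map_some]
      rw [ih]
      congr 1
      have hsuf : bs' <:+ b2 := (pvInnerS_suffix _ _ _ _ h).trans (List.drop_suffix ind b2)
      exact ((List.suffix_iff_eq_drop.mp hsuf).symm)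

lemma pvOuterS_loopB (a : List Int) :
    ∀ (bs : List Int) (i : Nat),
      pvOuterS (a.drop i) bs =
        (match pvLoopB a bs i with
         | none => false
         | some j => decide (a.length ≤ j)) := by
  intro bs
  induction bs with
  | nil =>
    intro i
    by_cases h : a.length ≤ i
    · simp [pvLoopB, List.drop_eq_nil_of_le h, pvOuterS, h]
    · rw [not_le] at h
      rw [List.drop_eq_getElem_cons h]
      simp [pvLoopB, pvOuterS, pvInnerS, not_le.mpr h]
  | cons b bs' ih =>
    intro i
    by_cases h : a.length ≤ i
    · simp [pvLoopB, h, List.drop_eq_nil_of_le h, pvOuterS]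
    · rw [not_le] at h
      have hbang : a[i]! = a[i] := by
        simp [List.getElem!_eq_getElem?_getD, List.getElem?_eq_getElem h]
      have hdrop := List.drop_eq_getElem_cons h
      have hhead : (a.drop (i + 1)).head? = a[i + 1]? := by
        simp [List.head?_drop]
      rw [hdrop]
      simp only [pvOuterS, pvInnerS, hhead, pvLoopB, if_neg (not_le.mpr h), hbang]
      split_ifs with h1 h2
      · rfl
      · simpa using ih (i + 1)
      · have := ih i
        rw [hdrop] at this
        simp only [pvOuterS, hhead] at this
        rw [this]

-- ===== VERDICT (by name: the statement is the Claim_ definition above) =====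
theorem template_alternate_response_spec : Claim_equal_template_alternate_response := by
  intro trace event_set _hdom hpre
  unfold Spec_template_alternate_response
  match event_set, hpre with
  | [e1, e2], _ =>
    cases hl1 : trace.lookup e1 with
    | none => simp [template_alternate_response, template_alternate_response_alt, hl1]
    | some aps =>
      cases hl2 : trace.lookup e2 with
      | none => simp [template_alternate_response, template_alternate_response_alt, hl1, hl2]
      | some bps =>
        simp only [template_alternate_response, template_alternate_response_alt, hl1, hl2,
          List.length_cons, List.length_nil, List.getElem!_cons_zero, List.getElem!_cons_succ,
          Option.isNone_some, Option.getD_some, Bool.false_eq_true, if_false, if_true]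
        have h1 : pvOuterA bps aps 0 = pvOuterS aps bps := by
          simpa using pvOuterA_eq bps aps 0
        have h2 := pvOuterS_loopB aps bps 0
        simp only [List.drop_zero] at h2
        rw [h1, h2]
        cases h : pvLoopB aps bps 0 with
        | none => simp
        | some j =>
          by_cases hj : aps.length ≤ j
          · simp [hj, not_lt.mpr hj]
          · simp [hj, lt_of_not_ge hj]
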